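-- pv_equiv track=rewrite | github.com/Diego-a-lopez/CSAI-Cifrado | aleja/mi_kasiski/mainCompletoV2.py | obtener_subcadenas_mayor_longitud
-- ===== SOURCE A (Python) =====
-- def obtener_subcadenas_mayor_longitud(subcadenas, max_longitud):
--     subcadenas_mayor_longitud = [subcadena for subcadena in subcadenas if len(subcadena) == max_longitud]
--
--     # Si solo existe una cadena de maxima longitud, se buscan más cadenas
--     # de tamaño max_longitud - 1
--     if len(subcadenas_mayor_longitud) == 1:
--         subcadenas_salida = subcadenas_mayor_longitud[:]
--         longitud_anterior = max_longitud - 1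
--         while longitud_anterior >= 1:
--             subcadenas_anteriores = [subcadena for subcadena in subcadenas if len(subcadena) == longitud_anterior]
--             if subcadenas_anteriores:
--                 subcadenas_salida.extend(subcadenas_anteriores)
--                 break
--             longitud_anterior -= 1
--     else:
--         subcadenas_salida = subcadenas_mayor_longitud
--     return subcadenas_salida
-- ===== SOURCE B (Python) =====
-- def obtener_subcadenas_mayor_longitud(subcadenas, max_longitud):
--     grupos = {}
--     for s in subcadenas:
--         grupos.setdefault(len(s), []).append(s)
--     salida = grupos.get(max_longitud, [])
--     if len(salida) == 1:
--         candidatos = [l for l in grupos if 1 <= l < max_longitud]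
--         if candidatos:
--             salida = salida + grupos[max(candidatos)]
--     return salida
-- ===== Notes on version B (the rewrite author's own statement) =====
-- stated objective: alternative
-- what changed: A rescans the whole list once per candidate length, counting down from max_longitud-1 until a nonempty group appears; B instead groups the strings by length into a dict in one pass and picks the group of the largest key below max_longitud.
import Mathlib
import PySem

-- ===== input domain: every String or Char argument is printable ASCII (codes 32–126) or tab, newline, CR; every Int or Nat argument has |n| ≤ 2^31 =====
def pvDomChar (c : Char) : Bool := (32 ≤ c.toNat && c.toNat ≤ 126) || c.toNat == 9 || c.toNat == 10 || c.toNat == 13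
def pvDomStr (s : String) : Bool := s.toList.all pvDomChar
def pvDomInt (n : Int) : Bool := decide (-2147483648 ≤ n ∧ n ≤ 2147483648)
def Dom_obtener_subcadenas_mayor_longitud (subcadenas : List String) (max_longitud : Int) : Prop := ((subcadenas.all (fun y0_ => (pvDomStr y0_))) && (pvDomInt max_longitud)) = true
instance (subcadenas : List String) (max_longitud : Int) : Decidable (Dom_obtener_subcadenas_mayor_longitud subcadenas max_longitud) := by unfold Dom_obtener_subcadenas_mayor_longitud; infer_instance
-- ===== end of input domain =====

-- B replaces A's per-length downward rescan of the list with one grouping pass into a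
-- length-keyed dict plus a max over its keys (objective: alternative algorithm).

-- ===== PORT A =====
-- A's list comprehension [s for s in subcadenas if len(s) == L]
def pvFiltLen (subcadenas : List String) (L : Int) : List String :=
  subcadenas.filter (fun s => PySem.Str.len s == L)

-- A's while loop: longitud_anterior takes the values n, n-1, …, 1; breaks on the first
-- nonempty filter, yields [] if none is found.
def pvALoop (subcadenas : List String) : Nat → List String
  | 0 => []
  | Nat.succ k =>
    let subcadenas_anteriores := pvFiltLen subcadenas ((k : Int) + 1)
    if subcadenas_anteriores.isEmpty then pvALoop subcadenas k else subcadenas_anteriores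

def obtener_subcadenas_mayor_longitud (subcadenas : List String) (max_longitud : Int) : List String :=
  let subcadenas_mayor_longitud := pvFiltLen subcadenas max_longitud
  if subcadenas_mayor_longitud.length == 1 then
    subcadenas_mayor_longitud ++ pvALoop subcadenas (max_longitud - 1).toNat
  else subcadenas_mayor_longitud

-- ===== PORT B =====
def obtener_subcadenas_mayor_longitud_alt (subcadenas : List String) (max_longitud : Int) : List String :=
  let grupos : PySem.Dict Int (List String) :=
    subcadenas.foldl (fun d s => d.modify (PySem.Str.len s) [] (fun g => g ++ [s])) PySem.Dict.empty
  let salida := grupos.getD max_longitud []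
  if salida.length == 1 then
    let candidatos := grupos.keys.filter (fun l => decide (1 ≤ l ∧ l < max_longitud))
    match PySem.List.max? candidatos (fun y => y) with
    | some m => salida ++ grupos.getD m []
    | none => salida
  else salida

-- ===== PRECONDITION & SPEC =====
def Spec_obtener_subcadenas_mayor_longitud (subcadenas : List String) (max_longitud : Int) (out : List String) : Prop := out = obtener_subcadenas_mayor_longitud_alt subcadenas max_longitud
instance (subcadenas : List String) (max_longitud : Int) (out : List String) : Decidable (Spec_obtener_subcadenas_mayor_longitud subcadenas max_longitud out) := by unfold Spec_obtener_subcadenas_mayor_longitud; infer_instance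

-- ===== CLAIM (what is proved, stated in full; the proofs are below) =====
def Claim_equal_obtener_subcadenas_mayor_longitud : Prop := ∀ (subcadenas : List String) (max_longitud : Int), Dom_obtener_subcadenas_mayor_longitud subcadenas max_longitud → Spec_obtener_subcadenas_mayor_longitud subcadenas max_longitud (obtener_subcadenas_mayor_longitud subcadenas max_longitud)

-- ===== LEMMAS AND PROOFS =====

lemma pvGroup_getD (xs : List String) (d : PySem.Dict Int (List String)) (L : Int) :
    (xs.foldl (fun d s => d.modify (PySem.Str.len s) [] (fun g => g ++ [s])) d).getD L []
      = d.getD L [] ++ pvFiltLen xs L := by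
  induction xs generalizing d with
  | nil => simp [pvFiltLen]
  | cons s t ih =>
    simp only [List.foldl_cons, ih, PySem.Dict.getD_modify, pvFiltLen, List.filter_cons]
    by_cases h : (s.length : Int) = L
    · subst h; simp
    · simp [h, Ne.symm h]

lemma pvGroup_mem_keys (xs : List String) (d : PySem.Dict Int (List String)) (L : Int) :
    L ∈ (xs.foldl (fun d s => d.modify (PySem.Str.len s) [] (fun g => g ++ [s])) d).keys
      ↔ L ∈ d.keys ∨ ∃ s ∈ xs, PySem.Str.len s = L := by
  induction xs generalizing d with
  | nil => simp
  | cons s t ih =>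
    rw [List.foldl_cons, ih]
    rw [← PySem.Dict.contains_iff_mem_keys, PySem.Dict.contains_modify]
    simp only [List.mem_cons, ← PySem.Dict.contains_iff_mem_keys, Bool.or_eq_true, beq_iff_eq]
    constructor
    · rintro (h | h)
      · rcases h with h | h
        · exact Or.inr ⟨s, Or.inl rfl, h.symm⟩
        · exact Or.inl (by simp_all [PySem.Dict.contains_iff_mem_keys])
      · rcases h with ⟨w, hw, hl⟩
        exact Or.inr ⟨w, Or.inr hw, hl⟩
    · rintro (h | ⟨w, hw | hw, hl⟩)
      · exact Or.inl (Or.inr (by simp_all [PySem.Dict.contains_iff_mem_keys]))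
      · subst hw; exact Or.inl (Or.inl hl.symm)
      · exact Or.inr ⟨w, hw, hl⟩

lemma pvFiltLen_ne_nil_iff (xs : List String) (L : Int) :
    pvFiltLen xs L ≠ [] ↔ ∃ s ∈ xs, PySem.Str.len s = L := by
  simp [pvFiltLen, List.filter_eq_nil_iff]

lemma pvALoop_nil (xs : List String) (n : Nat)
    (h : ∀ l : Int, 1 ≤ l → l ≤ (n : Int) → pvFiltLen xs l = []) : pvALoop xs n = [] := by
  induction n with
  | zero => rfl
  | succ k ih =>
    have he : pvFiltLen xs ((k : Int) + 1) = [] := h _ (by omega) (by push_cast; omega)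
    simp only [pvALoop, he, List.isEmpty_nil, if_pos]
    exact ih (fun l h1 h2 => h l h1 (by push_cast at h2 ⊢; omega))

lemma pvALoop_find (xs : List String) (n : Nat) (m : Int) (h1 : 1 ≤ m) (h2 : m ≤ (n : Int))
    (hne : pvFiltLen xs m ≠ [])
    (hmax : ∀ l : Int, m < l → l ≤ (n : Int) → pvFiltLen xs l = []) :
    pvALoop xs n = pvFiltLen xs m := by
  induction n with
  | zero => simp at h2; omega
  | succ k ih =>
    by_cases hm : m = (k : Int) + 1
    · simp only [pvALoop]
      rw [if_neg (by simpa [List.isEmpty_iff, ← hm] using hne)]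
      exact hm ▸ rfl
    · have he : pvFiltLen xs ((k : Int) + 1) = [] :=
        hmax _ (by push_cast at h2 ⊢; omega) (by push_cast; omega)
      simp only [pvALoop, he, List.isEmpty_nil, if_pos]
      exact ih (by push_cast at h2 ⊢; omega)
        (fun l hl1 hl2 => hmax l hl1 (by push_cast at hl2 ⊢; omega))

-- ===== VERDICT (by name: the statement is the Claim_ definition above) =====
theorem obtener_subcadenas_mayor_longitud_spec : Claim_equal_obtener_subcadenas_mayor_longitud := by
  intro xs M _
  unfold Spec_obtener_subcadenas_mayor_longitud
  unfold obtener_subcadenas_mayor_longitud obtener_subcadenas_mayor_longitud_alt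
  have hgetD : ∀ L : Int,
      ((xs.foldl (fun d s => d.modify (PySem.Str.len s) [] (fun g => g ++ [s]))
        PySem.Dict.empty).getD L []) = pvFiltLen xs L := by
    intro L
    rw [pvGroup_getD]
    simp [pysem]
  have hkeys : ∀ L : Int,
      (L ∈ (xs.foldl (fun d s => d.modify (PySem.Str.len s) [] (fun g => g ++ [s]))
        PySem.Dict.empty).keys) ↔ pvFiltLen xs L ≠ [] := by
    intro L
    rw [pvGroup_mem_keys, pvFiltLen_ne_nil_iff]
    simp [pysem]
  simp only [hgetD]
  by_cases h1 : (pvFiltLen xs M).length = 1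
  · simp only [h1, beq_self_eq_true, if_pos]
    cases hmx : PySem.List.max?
        ((xs.foldl (fun d s => d.modify (PySem.Str.len s) [] (fun g => g ++ [s]))
          PySem.Dict.empty).keys.filter (fun l => decide (1 ≤ l ∧ l < M))) (fun y => y) with
    | none =>
      rw [PySem.List.max?_eq_none_iff] at hmx
      rw [pvALoop_nil xs _ ?_]
      · simp
      · intro l hl1 hl2
        by_contra hne
        have hlM : l < M := by omega
        have hmem : l ∈ (xs.foldl (fun d s => d.modify (PySem.Str.len s) [] (fun g => g ++ [s]))
            PySem.Dict.empty).keys.filter (fun l => decide (1 ≤ l ∧ l < M)) :=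
          List.mem_filter.2 ⟨(hkeys l).2 hne, by simp [hl1, hlM]⟩
        rw [hmx] at hmem
        simp at hmem
    | some m =>
      have hmem := PySem.List.max?_mem hmx
      have hisM := PySem.List.max?_isMax hmx
      obtain ⟨hmk, hmc⟩ := List.mem_filter.1 hmem
      have hmc' : 1 ≤ m ∧ m < M := by simpa using hmc
      have hne : pvFiltLen xs m ≠ [] := (hkeys m).1 hmk
      rw [pvALoop_find xs _ m hmc'.1 (by omega) hne ?_]
      intro l hl1 hl2
      by_contra hlne
      have hmem' : l ∈ (xs.foldl (fun d s => d.modify (PySem.Str.len s) [] (fun g => g ++ [s]))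
          PySem.Dict.empty).keys.filter (fun l => decide (1 ≤ l ∧ l < M)) :=
        List.mem_filter.2 ⟨(hkeys l).2 hlne, by simp; constructor <;> omega⟩
      have := hisM l hmem'
      omega
  · have hb : ((pvFiltLen xs M).length == 1) = false := by simpa using h1
    simp [hb]
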